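-- pv_equiv track=rewrite | github.com/fnDxrk/Sibsutis | Курс 4/Семестр 2/TI/main_5.py | count_errors
-- ===== SOURCE A (Python) =====
-- def count_errors(original, decoded):
--     errors = 0
--     min_len = min(len(original), len(decoded))
--     for i in range(min_len):
--         if original[i] != decoded[i]:
--             errors += 1
--     errors += abs(len(original) - len(decoded))
--     return errors
-- ===== SOURCE B (Python) =====
-- def count_errors(original, decoded):
--     n = max(len(original), len(decoded))
--     padded_orig = [original[i] if i < len(original) else None for i in range(n)]
--     padded_dec = [decoded[i] if i < len(decoded) else None for i in range(n)]
--     return sum(1 for a, b in zip(padded_orig, padded_dec) if a != b)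
-- ===== Notes on version B (the rewrite author's own statement) =====
-- stated objective: alternative
-- what changed: Pads both sequences with None up to the maximum length and computes a plain Hamming distance over the padded sequences, eliminating A's min-length loop and the separate abs(length-difference) addition (each unmatched tail position is a None-vs-char mismatch).
import Mathlib
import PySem

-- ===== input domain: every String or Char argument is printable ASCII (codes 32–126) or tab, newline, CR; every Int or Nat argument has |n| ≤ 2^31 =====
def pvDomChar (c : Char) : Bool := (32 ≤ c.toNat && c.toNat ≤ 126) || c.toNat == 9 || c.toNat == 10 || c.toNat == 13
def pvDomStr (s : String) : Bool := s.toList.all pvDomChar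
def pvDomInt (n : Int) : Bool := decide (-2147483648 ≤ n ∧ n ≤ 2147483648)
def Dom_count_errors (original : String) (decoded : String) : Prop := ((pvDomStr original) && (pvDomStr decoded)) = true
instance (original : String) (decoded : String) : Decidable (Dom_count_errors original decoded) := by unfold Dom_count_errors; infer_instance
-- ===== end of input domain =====

-- B pads both sequences with None up to the maximum length and computes a plain Hamming
-- distance over the padded sequences, instead of A's min-length mismatch loop plus a
-- separate abs(length-difference) addition; an alternative decomposition, same cost.

-- ===== PORT A =====
-- original[i]/decoded[i] with 0 ≤ i < min length: PySem.List.pyGetD is exact here (index always in range).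
def count_errors (original : String) (decoded : String) : Int :=
  let errors : Int := 0
  let min_len : Int := min (PySem.Str.len original) (PySem.Str.len decoded)
  let errors :=
    (PySem.List.pyRange 0 min_len 1).foldl
      (fun errors i =>
        if PySem.List.pyGetD original.toList i ' ' ≠ PySem.List.pyGetD decoded.toList i ' '
        then errors + 1 else errors) errors
  let errors := errors + |PySem.Str.len original - PySem.Str.len decoded|
  errors

-- ===== PORT B =====
-- '[xs[i] if i < len(xs) else None for i in range(n)]' (index always in range where taken)
def pvPadTo (xs : List Char) (n : Int) : List (Option Char) :=
  (PySem.List.pyRange 0 n 1).map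
    (fun i => if i < (xs.length : Int) then some (PySem.List.pyGetD xs i ' ') else none)

def count_errors_alt (original : String) (decoded : String) : Int :=
  let n : Int := max (PySem.Str.len original) (PySem.Str.len decoded)
  let padded_orig := pvPadTo original.toList n
  let padded_dec := pvPadTo decoded.toList n
  ((padded_orig.zip padded_dec).countP (fun ab => ab.1 != ab.2) : Int)

-- ===== PRECONDITION & SPEC =====
def Spec_count_errors (original : String) (decoded : String) (out : Int) : Prop := out = count_errors_alt original decoded
instance (original : String) (decoded : String) (out : Int) : Decidable (Spec_count_errors original decoded out) := by unfold Spec_count_errors; infer_instance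

-- ===== CLAIM (what is proved, stated in full; the proofs are below) =====
def Claim_equal_count_errors : Prop := ∀ (original : String) (decoded : String), Dom_count_errors original decoded → Spec_count_errors original decoded (count_errors original decoded)

-- ===== LEMMAS AND PROOFS =====

-- Hamming distance over the None-padded lists = aligned mismatches + the padded tail.
lemma pad_count (xs ys : List Char) :
    (List.range (max xs.length ys.length)).countP
      (fun k => decide ((if k < xs.length then some (xs.getD k ' ') else none)
                      ≠ (if k < ys.length then some (ys.getD k ' ') else none)))
    = (List.range (min xs.length ys.length)).countP
        (fun k => decide (xs.getD k ' ' ≠ ys.getD k ' '))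
      + (max xs.length ys.length - min xs.length ys.length) := by
  set la := xs.length
  set lb := ys.length
  have hsplit : max la lb = min la lb + (max la lb - min la lb) := by omega
  rw [hsplit, List.range_add, List.countP_append]
  congr 1
  · apply List.countP_congr
    intro k hk
    have hk' : k < min la lb := List.mem_range.mp hk
    have h1 : k < la := by omega
    have h2 : k < lb := by omega
    simp [h1, h2]
  · rw [List.countP_map]
    have hall : ∀ j ∈ List.range (max la lb - min la lb),
        ((fun k => decide ((if k < la then some (xs.getD k ' ') else none)
                         ≠ (if k < lb then some (ys.getD k ' ') else none)))
          ∘ (fun j => min la lb + j)) j = true := by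
      intro j hj
      have hj' : j < max la lb - min la lb := List.mem_range.mp hj
      rcases le_total la lb with h | h
      · have h1 : ¬ (min la lb + j < la) := by omega
        have h2 : min la lb + j < lb := by omega
        simp [Function.comp, h1, h2]
      · have h1 : min la lb + j < la := by omega
        have h2 : ¬ (min la lb + j < lb) := by omega
        simp [Function.comp, h1, h2]
    rw [List.countP_eq_length.mpr hall, List.length_range]
    omega

theorem count_errors_spec : Claim_equal_count_errors := by
  intro original decoded _
  unfold Spec_count_errors count_errors count_errors_alt pvPadTo
  simp only [PySem.Str.len_eq]
  set xs := original.toList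
  set ys := decoded.toList
  rw [PySem.List.foldl_ite_add_one]
  rw [List.zip_map', List.countP_map]
  rw [PySem.List.pyRange_one, PySem.List.pyRange_one, List.countP_map, List.countP_map]
  have hmin : ((min (xs.length : Int) (ys.length : Int)) - 0).toNat = min xs.length ys.length := by omega
  have hmax : ((max (xs.length : Int) (ys.length : Int)) - 0).toNat = max xs.length ys.length := by omega
  rw [hmin, hmax]
  have hB : (List.range (max xs.length ys.length)).countP
      (((fun ab : Option Char × Option Char => ab.1 != ab.2)
        ∘ fun i : Int => ((if i < (xs.length : Int) then some (PySem.List.pyGetD xs i ' ') else none),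
                           (if i < (ys.length : Int) then some (PySem.List.pyGetD ys i ' ') else none)))
        ∘ fun k : Nat => (0 : Int) + k)
      = (List.range (max xs.length ys.length)).countP
        (fun k => decide ((if k < xs.length then some (xs.getD k ' ') else none)
                        ≠ (if k < ys.length then some (ys.getD k ' ') else none))) := by
    apply List.countP_congr
    intro k _
    simp [Function.comp, PySem.List.pyGetD_natCast, bne]
  have hA : (List.range (min xs.length ys.length)).countP
      ((fun i : Int => decide (PySem.List.pyGetD xs i ' ' ≠ PySem.List.pyGetD ys i ' '))
        ∘ (fun k : Nat => (0 : Int) + k))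
      = (List.range (min xs.length ys.length)).countP
        (fun k => decide (xs.getD k ' ' ≠ ys.getD k ' ')) := by
    apply List.countP_congr
    intro k _
    simp [Function.comp, PySem.List.pyGetD_natCast]
  rw [hB, hA, pad_count]
  have habs : |(xs.length : Int) - (ys.length : Int)|
      = ((max xs.length ys.length - min xs.length ys.length : Nat) : Int) := by
    rw [Int.abs_eq_natAbs]; omega
  rw [habs]
  push_cast
  omega
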